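-- pv_equiv track=rewrite | github.com/eerovil/musescore-choir-plugins | src/clean_score/lyric_txt.py | _syllables_to_tokens
-- ===== SOURCE A (Python) =====
-- from typing import Any, Dict, List, Optional, Tuple
--
-- def _syllables_to_tokens(syllables: List[Tuple[str, str]]) -> List[str]:
--     """
--     Convert (syllabic, text) pairs back to tokens (e.g. begin+end -> "a-b", single -> "a", begin-only -> "a-").
--     """
--     tokens: List[str] = []
--     i = 0
--     while i < len(syllables):
--         syllabic, text = syllables[i]
--         if syllabic == "_":
--             tokens.append("_")
--             i += 1
--         elif syllabic == "single":
--             tokens.append(text)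
--             i += 1
--         elif syllabic == "begin":
--             parts = [text]
--             i += 1
--             while i < len(syllables):
--                 s2, t2 = syllables[i]
--                 if s2 == "middle":
--                     parts.append(t2)
--                     i += 1
--                 elif s2 == "end":
--                     parts.append(t2)
--                     i += 1
--                     tokens.append("-".join(parts))
--                     break
--                 else:
--                     break
--             else:
--                 tokens.append("-".join(parts) + "-")
--         elif syllabic == "end":
--             tokens.append(text)
--             i += 1
--         elif syllabic == "middle":
--             tokens.append(text)
--             i += 1
--         else:
--             i += 1
--     return tokens
-- ===== SOURCE B (Python) =====
-- from typing import List, Tuple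
--
-- def _syllables_to_tokens(syllables: List[Tuple[str, str]]) -> List[str]:
--     """Flat single loop with a `group` state variable instead of a nested inner loop."""
--     tokens: List[str] = []
--     group = None  # None = outside a begin-run; else the collected parts
--     i = 0
--     n = len(syllables)
--     while i < n:
--         syllabic, text = syllables[i]
--         if group is not None:
--             if syllabic == "middle":
--                 group.append(text)
--                 i += 1
--             elif syllabic == "end":
--                 group.append(text)
--                 tokens.append("-".join(group))
--                 group = None
--                 i += 1
--             else:
--                 # interrupted begin-run: discard it, reprocess this token
--                 group = None
--         else:
--             if syllabic == "_":
--                 tokens.append("_")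
--             elif syllabic == "single":
--                 tokens.append(text)
--             elif syllabic == "begin":
--                 group = [text]
--             elif syllabic in ("end", "middle"):
--                 tokens.append(text)
--             i += 1
--     if group is not None:
--         tokens.append("-".join(group) + "-")
--     return tokens
-- ===== Notes on version B (the rewrite author's own statement) =====
-- stated objective: simpler
-- what changed: Replaced A's nested inner while-loop over a begin-run with a single flat loop maintaining a `group` state variable (None outside a run, collected parts inside), with the interrupting token reprocessed without advancing and an open group flushed as join+'-' after the loop.
import Mathlib
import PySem

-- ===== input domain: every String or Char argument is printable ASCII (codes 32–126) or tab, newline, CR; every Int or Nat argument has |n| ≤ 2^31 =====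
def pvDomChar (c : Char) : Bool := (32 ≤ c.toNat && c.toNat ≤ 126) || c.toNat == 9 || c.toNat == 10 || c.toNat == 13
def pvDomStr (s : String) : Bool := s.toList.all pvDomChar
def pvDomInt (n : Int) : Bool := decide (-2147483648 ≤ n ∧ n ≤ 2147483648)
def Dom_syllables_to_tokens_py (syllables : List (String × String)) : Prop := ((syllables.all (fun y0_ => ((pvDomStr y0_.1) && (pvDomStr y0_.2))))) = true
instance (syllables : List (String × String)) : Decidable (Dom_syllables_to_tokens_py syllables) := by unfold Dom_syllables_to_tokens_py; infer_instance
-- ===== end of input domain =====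

-- B replaces A's nested inner while-loop by a single flat loop with a `group` state variable (objective: simpler).

-- ===== PORT A =====
-- A's inner `while` over the begin-run: consumes middles, stops at an `end`
-- (emitting the joined token), stops without emitting on any other token
-- (leaving it unconsumed), and emits join+"-" when the list is exhausted
-- (Python's while-else). Returns (remaining suffix, emitted token if any).
def pvInnerA (parts : List String) (rest : List (String × String)) :
    List (String × String) × Option String :=
  match rest with
  | [] => ([], some (String.intercalate "-" parts ++ "-"))
  | (s2, t2) :: rest' =>
      if s2 = "middle" then pvInnerA (parts ++ [t2]) rest'
      else if s2 = "end" then (rest', some (String.intercalate "-" (parts ++ [t2])))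
      else ((s2, t2) :: rest', none)

theorem pvInnerA_len (parts : List String) (rest : List (String × String)) :
    (pvInnerA parts rest).1.length ≤ rest.length := by
  induction rest generalizing parts with
  | nil => simp [pvInnerA]
  | cons h t ih =>
      obtain ⟨s2, t2⟩ := h
      simp only [pvInnerA]
      split_ifs with h1 h2
      · exact Nat.le_succ_of_le (ih _)
      · simp
      · simp

def syllables_to_tokens_py (syllables : List (String × String)) : List String :=
  match syllables with
  | [] => []
  | (s, t) :: rest =>
      if s = "_" then "_" :: syllables_to_tokens_py rest
      else if s = "single" then t :: syllables_to_tokens_py rest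
      else if s = "begin" then
        (pvInnerA [t] rest).2.toList ++ syllables_to_tokens_py (pvInnerA [t] rest).1
      else if s = "end" then t :: syllables_to_tokens_py rest
      else if s = "middle" then t :: syllables_to_tokens_py rest
      else syllables_to_tokens_py rest
termination_by syllables.length
decreasing_by
  all_goals simp only [List.length_cons]
  all_goals first
    | omega
    | exact Nat.lt_succ_of_le (pvInnerA_len _ _)

-- ===== PORT B =====
-- Source B's flat loop: `group = none` means outside a begin-run; `some g` carries
-- the collected parts.  The interrupted-run branch reprocesses the same token
-- with `group` reset (no advance), exactly as Source B leaves `i` unchanged.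
def pvGoB (group : Option (List String)) (rest : List (String × String)) : List String :=
  match group, rest with
  | some g, [] => [String.intercalate "-" g ++ "-"]
  | none, [] => []
  | some g, (s, t) :: rest' =>
      if s = "middle" then pvGoB (some (g ++ [t])) rest'
      else if s = "end" then String.intercalate "-" (g ++ [t]) :: pvGoB none rest'
      else pvGoB none ((s, t) :: rest')
  | none, (s, t) :: rest' =>
      if s = "_" then "_" :: pvGoB none rest'
      else if s = "single" then t :: pvGoB none rest'
      else if s = "begin" then pvGoB (some [t]) rest'
      else if s = "end" ∨ s = "middle" then t :: pvGoB none rest'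
      else pvGoB none rest'
termination_by (rest.length, match group with | some _ => 1 | none => 0)
decreasing_by all_goals simp_all [Prod.lex_iff]; try omega

def syllables_to_tokens_py_alt (syllables : List (String × String)) : List String :=
  pvGoB none syllables

-- ===== PRECONDITION & SPEC =====
def Spec_syllables_to_tokens_py (syllables : List (String × String)) (out : List String) : Prop := out = syllables_to_tokens_py_alt syllables
instance (syllables : List (String × String)) (out : List String) : Decidable (Spec_syllables_to_tokens_py syllables out) := by unfold Spec_syllables_to_tokens_py; infer_instance

-- ===== CLAIM (what is proved, stated in full; the proofs are below) =====
def Claim_equal_syllables_to_tokens_py : Prop := ∀ (syllables : List (String × String)), Dom_syllables_to_tokens_py syllables → Spec_syllables_to_tokens_py syllables (syllables_to_tokens_py syllables)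

-- ===== LEMMAS AND PROOFS =====

-- While inside a begin-run, B's flat loop computes what A's inner loop computes.
theorem pvGoB_some (parts : List String) (rest : List (String × String)) :
    pvGoB (some parts) rest =
      (pvInnerA parts rest).2.toList ++ pvGoB none (pvInnerA parts rest).1 := by
  induction rest generalizing parts with
  | nil => simp [pvGoB, pvInnerA]
  | cons h t ih =>
      obtain ⟨s2, t2⟩ := h
      by_cases h1 : s2 = "middle"
      · rw [pvGoB, pvInnerA]; simp only [h1, String.reduceEq, reduceIte]; exact ih _
      · by_cases h2 : s2 = "end"
        · rw [pvGoB, pvInnerA]; simp [h2]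
        · rw [pvGoB, pvInnerA]; simp [h1, h2]


theorem pvA_eq_pvGoB : ∀ (n : Nat) (rest : List (String × String)),
    rest.length ≤ n → syllables_to_tokens_py rest = pvGoB none rest := by
  intro n
  induction n with
  | zero =>
      intro rest h
      rw [List.length_eq_zero_iff.mp (Nat.le_zero.mp h)]
      simp [syllables_to_tokens_py, pvGoB]
  | succ n ih =>
      intro rest h
      match rest with
      | [] => simp [syllables_to_tokens_py, pvGoB]
      | (s, t) :: rest' =>
          simp only [List.length_cons, Nat.succ_le_succ_iff] at h
          rw [syllables_to_tokens_py, pvGoB]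
          by_cases h1 : s = "_"
          · simp [h1, ih rest' h]
          by_cases h2 : s = "single"
          · simp [h2, ih rest' h]
          by_cases h3 : s = "begin"
          · simp only [h3, String.reduceEq, reduceIte]
            rw [pvGoB_some, ih (pvInnerA [t] rest').1 (le_trans (pvInnerA_len _ _) h)]
          by_cases h4 : s = "end"
          · simp [h4, ih rest' h]
          by_cases h5 : s = "middle"
          · simp [h5, ih rest' h]
          · simp [h1, h2, h3, h4, h5, ih rest' h]

-- ===== VERDICT (by name: the statement is the Claim_ definition above) =====
theorem syllables_to_tokens_py_spec : Claim_equal_syllables_to_tokens_py := by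
  intro syllables _
  unfold Spec_syllables_to_tokens_py syllables_to_tokens_py_alt
  exact pvA_eq_pvGoB syllables.length syllables le_rfl
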